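-- pv_equiv track=rewrite | github.com/PatoLocos/Erdos530 | experiments/test_axiom_general.py | is_sidon
-- ===== SOURCE A (Python) =====
-- def is_sidon(S):
--     S = sorted(S)
--     sums = set()
--     for i in range(len(S)):
--         for j in range(i, len(S)):
--             s = S[i] + S[j]
--             if s in sums:
--                 return False
--             sums.add(s)
--     return True
-- ===== SOURCE B (Python) =====
-- def is_sidon(S):
--     # Classical characterization: a set is Sidon (all pairwise sums distinct,
--     # doubles included) iff it has no repeated element and all differences
--     # b - a over ordered pairs of distinct elements are pairwise distinct.
--     n = len(S)
--     if len(set(S)) != n: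
--         return False
--     diffs = {b - a for a in S for b in S if b != a}
--     return len(diffs) == n * (n - 1)
-- ===== Notes on version B (the rewrite author's own statement) =====
-- stated objective: alternative
-- what changed: Replaces A's sort plus incremental seen-set scan of pairwise SUMS by the classical dual Sidon criterion: no repeated element (a set-cardinality check, no sort) and all DIFFERENCES b - a over ordered pairs of distinct elements pairwise distinct, decided by one cardinality comparison len(diffs) == n*(n-1).
import Mathlib
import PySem

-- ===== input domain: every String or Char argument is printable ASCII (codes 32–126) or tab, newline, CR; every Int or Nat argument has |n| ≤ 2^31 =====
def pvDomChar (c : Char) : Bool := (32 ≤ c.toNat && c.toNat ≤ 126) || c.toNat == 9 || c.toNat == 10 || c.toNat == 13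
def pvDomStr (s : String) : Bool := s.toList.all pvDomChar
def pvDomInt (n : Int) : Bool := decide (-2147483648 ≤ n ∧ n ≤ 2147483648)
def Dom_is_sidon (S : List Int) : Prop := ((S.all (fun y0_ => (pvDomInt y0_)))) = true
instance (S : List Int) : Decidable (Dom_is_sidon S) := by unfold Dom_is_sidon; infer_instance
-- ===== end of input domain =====

-- B replaces A's scan of pairwise SUMS by the classical dual criterion: no repeated
-- element and all DIFFERENCES b - a over ordered pairs of distinct elements distinct.

-- ===== PORT A =====
-- one step of A's body: 'if s in sums: return False' (none) else 'sums.add(s)'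
def pvStep (sums : PySem.Set Int) (s : Int) : Option (PySem.Set Int) :=
  if PySem.Set.contains sums s then none else some (PySem.Set.add sums s)

-- inner loop 'for j in range(i, len(S))'; indices come from range(len(S)), so they are
-- always in range and pyGetD _ _ 0 is exact here (never hits the default)
def pvInnerA (S' : List Int) (i : Int) (acc : Option (PySem.Set Int)) : Option (PySem.Set Int) :=
  (PySem.List.pyRange i (PySem.List.len S') 1).foldl
    (fun acc2 j => acc2.bind (fun sums => pvStep sums (PySem.List.pyGetD S' i 0 + PySem.List.pyGetD S' j 0))) acc

-- outer loop 'for i in range(len(S))'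
def pvOuterA (S' : List Int) : Option (PySem.Set Int) :=
  (PySem.List.pyRange 0 (PySem.List.len S') 1).foldl (fun acc i => pvInnerA S' i acc) (some PySem.Set.empty)

def is_sidon (S : List Int) : Bool :=
  (pvOuterA (PySem.List.sorted S (fun x => x) false)).isSome

-- ===== PORT B =====
-- the comprehension '[b - a for a in S for b in S if b != a]' (the set built from it)
def pvDiffList (S : List Int) : List Int :=
  S.flatMap (fun a => (S.filter (fun b => b != a)).map (fun b => b - a))

def is_sidon_alt (S : List Int) : Bool :=
  let n : Int := PySem.List.len S
  if ((PySem.Set.ofList S).length : Int) ≠ n then false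
  else (((PySem.Set.ofList (pvDiffList S)).length : Int) == n * (n - 1))

-- ===== PRECONDITION & SPEC =====
def Spec_is_sidon (S : List Int) (out : Bool) : Prop := out = is_sidon_alt S
instance (S : List Int) (out : Bool) : Decidable (Spec_is_sidon S out) := by unfold Spec_is_sidon; infer_instance

-- ===== CLAIM (what is proved, stated in full; the proofs are below) =====
def Claim_equal_is_sidon : Prop := ∀ (S : List Int), Dom_is_sidon S → Spec_is_sidon S (is_sidon S)

-- ===== LEMMAS AND PROOFS =====

-- A's incremental check, abstracted over the stream of sums it sees
def chk (acc : Option (PySem.Set Int)) (l : List Int) : Option (PySem.Set Int) :=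
  l.foldl (fun a s => a.bind (fun sums => pvStep sums s)) acc

-- the stream of sums A sees: x+x and x+y for later y, then the rest
def cwrSums : List Int → List Int
  | [] => []
  | x :: xs => (x + x) :: xs.map (fun y => x + y) ++ cwrSums xs

-- the corresponding unordered pairs (i ≤ j), used to reason about injectivity
def cwrPairs : List Int → List (Int × Int)
  | [] => []
  | x :: xs => (x, x) :: xs.map (fun y => (x, y)) ++ cwrPairs xs

-- the ordered distinct pairs behind pvDiffList
def dPairs (S : List Int) : List (Int × Int) :=
  S.flatMap (fun a => (S.filter (fun b => b != a)).map (fun b => (a, b)))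

-- semantic forms of the two distinctness criteria
def SumInj (S : List Int) : Prop :=
  ∀ a ∈ S, ∀ b ∈ S, ∀ c ∈ S, ∀ d ∈ S,
    a ≤ b → c ≤ d → a + b = c + d → a = c ∧ b = d

def DiffInj (S : List Int) : Prop :=
  ∀ a ∈ S, ∀ b ∈ S, ∀ c ∈ S, ∀ d ∈ S,
    b ≠ a → d ≠ c → b - a = d - c → a = c ∧ b = d

lemma chk_append (acc : Option (PySem.Set Int)) (l₁ l₂ : List Int) :
    chk acc (l₁ ++ l₂) = chk (chk acc l₁) l₂ := by
  simp [chk, List.foldl_append]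

lemma chk_none (l : List Int) : chk none l = none := by
  induction l with
  | nil => rfl
  | cons x xs ih => simpa [chk] using ih

-- the incremental check succeeds exactly when the stream extends the seen set without repeats
lemma chk_some (l : List Int) : ∀ (s : List Int), s.Nodup →
    chk (some s) l = if (s ++ l).Nodup then some (s ++ l) else none := by
  induction l with
  | nil => intro s hs; simp [chk, hs]
  | cons x xs ih =>
    intro s hs
    by_cases hx : x ∈ s
    · have h1 : chk (some s) (x :: xs) = none := by
        simp only [chk, List.foldl_cons, Option.bind_some]
        have : pvStep s x = none := by simp [pvStep, hx]
        rw [this]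
        simpa [chk, pvStep] using chk_none xs
      have h2 : ¬ (s ++ x :: xs).Nodup := by
        intro h
        exact (List.disjoint_of_nodup_append h) hx (by simp)
      simp [h1, h2]
    · have hadd : PySem.Set.add s x = s ++ [x] := by
        simp [PySem.Set.add, PySem.Set.contains, hx]
      have h1 : chk (some s) (x :: xs) = chk (some (s ++ [x])) xs := by
        simp only [chk, List.foldl_cons, Option.bind_some]
        have : pvStep s x = some (s ++ [x]) := by simp [pvStep, hx]
        rw [this]
      have hsx : (s ++ [x]).Nodup := by
        simp [List.nodup_append, hs]
        exact fun a ha he => hx (he ▸ ha)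
      rw [h1, ih (s ++ [x]) hsx]
      have hperm : (s ++ x :: xs) = (s ++ [x]) ++ xs := by simp
      rw [hperm]

-- the inner index loop is a fold over the suffix from i (indices always in range)
lemma innerA_eq (S' : List Int) (i : Int) (hi : 0 ≤ i) (acc : Option (PySem.Set Int)) :
    pvInnerA S' i acc
      = chk acc (((S'.drop i.toNat).map (fun b => PySem.List.pyGetD S' i 0 + b))) := by
  unfold pvInnerA
  rw [PySem.List.foldl_pyRange_pyGetD (xs := S') (a := i) (d := 0)
      (f := fun a b => a.bind (fun sums => pvStep sums (PySem.List.pyGetD S' i 0 + b))) (init := acc) hi]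
  simp only [chk]
  rw [List.foldl_map]

-- the whole double loop, from start index k, is the incremental check of cwrSums of the suffix
lemma outerA_eq (S' : List Int) : ∀ (k : Nat) (acc : Option (PySem.Set Int)),
    (PySem.List.pyRange (k : Int) (PySem.List.len S') 1).foldl (fun acc i => pvInnerA S' i acc) acc
      = chk acc (cwrSums (S'.drop k)) := by
  simp only [PySem.List.len_eq]
  intro k
  induction hn : S'.length - k generalizing k with
  | zero =>
    intro acc
    have hk : (S'.length : Int) ≤ (k : Int) := by exact_mod_cast Nat.le_of_sub_eq_zero hn
    rw [PySem.List.pyRange_one_eq_nil hk]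
    have : S'.drop k = [] := List.drop_eq_nil_of_le (by omega)
    simp [this, cwrSums, chk]
  | succ m ih =>
    intro acc
    have hklt : k < S'.length := by omega
    have hkInt : (k : Int) < (S'.length : Int) := by exact_mod_cast hklt
    rw [PySem.List.pyRange_one_cons hkInt]
    rw [List.foldl_cons]
    have hx : ∃ x xs, S'.drop k = x :: xs := by
      rcases h : S'.drop k with _ | ⟨x, xs⟩
      · exfalso; have := List.drop_eq_nil_iff.1 h; omega
      · exact ⟨x, xs, rfl⟩
    rcases hx with ⟨x, xs, hdrop⟩
    have hget : PySem.List.pyGetD S' (k : Int) 0 = x := by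
      have h2 : S'[k]? = some x := by
        have h3 : (List.drop k S')[0]? = S'[k + 0]? := List.getElem?_drop
        rw [hdrop] at h3
        simpa using h3.symm
      simp [PySem.List.pyGetD_natCast, List.getD, h2]
    have hinner : pvInnerA S' (k : Int) acc
        = chk acc ((x + x) :: xs.map (fun y => x + y)) := by
      rw [innerA_eq S' (k : Int) (by positivity) acc]
      simp [hget, hdrop]
    have hsucc : ((k : Int) + 1) = ((k + 1 : Nat) : Int) := by push_cast; ring
    rw [hinner, hsucc, ih (k + 1) (by omega)]
    have hdrop1 : S'.drop (k + 1) = xs := by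
      rw [← List.tail_drop, hdrop]
      rfl
    rw [hdrop1, hdrop, cwrSums]
    rw [show ((x + x) :: xs.map (fun y => x + y) ++ cwrSums xs)
          = ((x + x) :: xs.map (fun y => x + y)) ++ cwrSums xs from by simp]
    rw [chk_append]

-- A succeeds exactly when the sums over the sorted list are pairwise distinct
lemma is_sidon_eq_nodup (S : List Int) :
    is_sidon S = decide ((cwrSums (PySem.List.sorted S (fun x => x) false)).Nodup) := by
  unfold is_sidon pvOuterA
  have h0 := outerA_eq (PySem.List.sorted S (fun x => x) false) 0 (some PySem.Set.empty)
  simp only [Nat.cast_zero, PySem.List.len_eq, List.drop_zero] at h0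
  simp only [PySem.List.len_eq]
  rw [h0]
  rw [chk_some _ PySem.Set.empty (by simp [PySem.Set.empty])]
  by_cases h : (cwrSums (PySem.List.sorted S (fun x => x) false)).Nodup
  · simp [PySem.Set.empty, h]
  · simp [PySem.Set.empty, h]

-- the pure list shuffle behind the swap case below
lemma perm_swap_aux {a b c : Int} (P Q R : List Int) :
    (c :: b :: (Q ++ (a :: (P ++ R)))).Perm (a :: b :: (P ++ (c :: (Q ++ R)))) := by
  have h1 : (Q ++ a :: (P ++ R)).Perm (a :: (Q ++ (P ++ R))) := List.perm_middle
  have h2 : (P ++ c :: (Q ++ R)).Perm (c :: (P ++ (Q ++ R))) := List.perm_middle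
  have htail : (Q ++ (P ++ R)).Perm (P ++ (Q ++ R)) := by
    rw [← List.append_assoc, ← List.append_assoc]
    exact List.perm_append_comm.append_right R
  have h3 : (c :: b :: a :: (Q ++ (P ++ R))).Perm (a :: c :: b :: (Q ++ (P ++ R))) :=
    List.perm_middle (l₁ := [c, b])
  have h4 : (c :: b :: (Q ++ (P ++ R))).Perm (b :: c :: (P ++ (Q ++ R))) :=
    (List.Perm.swap b c _).trans ((htail.cons c).cons b)
  exact (((h1.cons b).cons c).trans (h3.trans ((h4.cons a).trans ((h2.symm.cons b).cons a))))

-- cwrSums sends permutations to permutations (the multiset of pairwise sums is order-free)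
lemma cwrSums_perm {l₁ l₂ : List Int} (h : l₁.Perm l₂) :
    (cwrSums l₁).Perm (cwrSums l₂) := by
  induction h with
  | nil => exact List.Perm.refl _
  | cons x h ih =>
    simp only [cwrSums]
    exact List.Perm.cons _ (List.Perm.append (h.map _) ih)
  | swap x y l =>
    simp only [cwrSums, List.map_cons]
    rw [show y + x = x + y from by ring]
    exact perm_swap_aux (a := x + x) (b := x + y) (c := y + y) (P := l.map (fun b => x + b)) (Q := l.map (fun b => y + b)) (R := cwrSums l)
  | trans h₁ h₂ ih₁ ih₂ => exact ih₁.trans ih₂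

-- set(sums) keeps all of sums exactly when sums has no duplicate
lemma foldl_add_length_le (l : List Int) : ∀ (s : PySem.Set Int),
    (l.foldl PySem.Set.add s).length ≤ s.length + l.length := by
  induction l with
  | nil => intro s; simp
  | cons x xs ih =>
    intro s
    have hstep : (PySem.Set.add s x).length ≤ s.length + 1 := by
      by_cases h : x ∈ s <;> simp [PySem.Set.add, PySem.Set.contains, h]
    calc ((x :: xs).foldl PySem.Set.add s).length
        = (xs.foldl PySem.Set.add (PySem.Set.add s x)).length := by simp
      _ ≤ (PySem.Set.add s x).length + xs.length := ih _
      _ ≤ s.length + (x :: xs).length := by simp; omega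

lemma foldl_add_length_eq_iff (l : List Int) : ∀ (s : PySem.Set Int), s.Nodup →
    ((l.foldl PySem.Set.add s).length = s.length + l.length ↔ (s ++ l).Nodup) := by
  induction l with
  | nil => intro s hs; simp [hs]
  | cons x xs ih =>
    intro s hs
    by_cases hx : x ∈ s
    · have hadd : PySem.Set.add s x = s := by simp [PySem.Set.add, PySem.Set.contains, hx]
      constructor
      · intro h
        exfalso
        have hle := foldl_add_length_le xs s
        simp [hadd] at h
        omega
      · intro h
        exact absurd ((List.disjoint_of_nodup_append h) hx (by simp)) (by simp)
    · have hadd : PySem.Set.add s x = s ++ [x] := by simp [PySem.Set.add, PySem.Set.contains, hx]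
      have hsx : (s ++ [x]).Nodup := by
        simp [List.nodup_append, hs]
        exact fun a ha he => hx (he ▸ ha)
      have := ih (s ++ [x]) hsx
      simp only [List.foldl_cons, hadd] at *
      rw [show s ++ x :: xs = (s ++ [x]) ++ xs from by simp]
      rw [← this]
      rw [show List.length s + (x :: xs).length = (s ++ [x]).length + xs.length from by
        simp only [List.length_append, List.length_cons, List.length_nil]; omega]

lemma ofList_length_eq_iff (l : List Int) :
    ((PySem.Set.ofList l).length = l.length ↔ l.Nodup) := by
  have h := foldl_add_length_eq_iff l [] (by simp)
  simpa [PySem.Set.ofList_eq_foldl] using h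

-- === structure of cwrSums / pvDiffList as maps over pair lists ===

lemma cwrSums_eq_map (l : List Int) :
    cwrSums l = (cwrPairs l).map (fun p => p.1 + p.2) := by
  induction l with
  | nil => rfl
  | cons x xs ih => simp [cwrSums, cwrPairs, ih, List.map_map, Function.comp]

lemma diffList_eq_map (S : List Int) :
    pvDiffList S = (dPairs S).map (fun p => p.2 - p.1) := by
  unfold pvDiffList dPairs
  rw [List.map_flatMap]
  simp [List.map_map, Function.comp_def]

lemma mem_cwrPairs_sub {l : List Int} {p : Int × Int} (h : p ∈ cwrPairs l) :
    p.1 ∈ l ∧ p.2 ∈ l := by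
  induction l with
  | nil => simp [cwrPairs] at h
  | cons x xs ih =>
    rw [show cwrPairs (x :: xs) = (x, x) :: (xs.map (fun y => (x, y)) ++ cwrPairs xs) from rfl] at h
    rcases List.mem_cons.1 h with rfl | h
    · simp
    rcases List.mem_append.1 h with h | h
    · rcases List.mem_map.1 h with ⟨y, hy, rfl⟩
      simp [hy]
    · rcases ih h with ⟨h1, h2⟩
      exact ⟨List.mem_cons_of_mem _ h1, List.mem_cons_of_mem _ h2⟩

lemma nodup_cwrPairs {l : List Int} (h : l.Nodup) : (cwrPairs l).Nodup := by
  induction l with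
  | nil => simp [cwrPairs]
  | cons x xs ih =>
    rcases List.nodup_cons.1 h with ⟨hx, hxs⟩
    have hmap : (xs.map (fun y => (x, y))).Nodup :=
      List.Nodup.map (fun a b hab => congrArg Prod.snd hab) hxs
    have happ : ((xs.map (fun y => (x, y))) ++ cwrPairs xs).Nodup := by
      rw [List.nodup_append]
      refine ⟨hmap, ih hxs, ?_⟩
      intro p hp q hq heq
      rcases List.mem_map.1 hp with ⟨y, hy, rfl⟩
      subst heq
      have h2 := mem_cwrPairs_sub hq
      exact hx h2.1
    rw [show cwrPairs (x :: xs) = (x, x) :: (xs.map (fun y => (x, y)) ++ cwrPairs xs) from rfl]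
    refine List.nodup_cons.2 ⟨?_, happ⟩
    intro hmem
    rcases List.mem_append.1 hmem with h1 | h1
    · rcases List.mem_map.1 h1 with ⟨y, hy, he⟩
      have : y = x := congrArg Prod.snd he
      exact hx (this ▸ hy)
    · have h2 := mem_cwrPairs_sub h1
      exact hx h2.1

lemma mem_cwrPairs_sorted {l : List Int} (hs : l.Pairwise (· < ·)) (a b : Int) :
    (a, b) ∈ cwrPairs l ↔ a ∈ l ∧ b ∈ l ∧ a ≤ b := by
  induction l with
  | nil => simp [cwrPairs]
  | cons x xs ih =>
    rcases List.pairwise_cons.1 hs with ⟨hlt, hxs⟩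
    rw [show cwrPairs (x :: xs) = (x, x) :: (xs.map (fun y => (x, y)) ++ cwrPairs xs) from rfl]
    constructor
    · intro h
      rcases List.mem_cons.1 h with he | h
      · rcases Prod.mk.inj he with ⟨rfl, rfl⟩
        simp
      rcases List.mem_append.1 h with h | h
      · rcases List.mem_map.1 h with ⟨y, hy, he⟩
        rcases Prod.mk.inj he.symm with ⟨rfl, rfl⟩
        exact ⟨by simp, by simp [hy], le_of_lt (hlt _ hy)⟩
      · rcases (ih hxs).1 h with ⟨ha, hb, hab⟩
        exact ⟨List.mem_cons_of_mem _ ha, List.mem_cons_of_mem _ hb, hab⟩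
    · rintro ⟨ha, hb, hab⟩
      rcases List.mem_cons.1 ha with hax | ha'
      · rcases List.mem_cons.1 hb with hbx | hb'
        · rw [hax, hbx]; exact List.mem_cons_self
        · rw [hax]
          exact List.mem_cons_of_mem _ (List.mem_append.2 (Or.inl (List.mem_map.2 ⟨b, hb', rfl⟩)))
      · rcases List.mem_cons.1 hb with hbx | hb'
        · exact absurd hab (not_le.2 (hbx ▸ hlt _ ha'))
        · exact List.mem_cons_of_mem _ (List.mem_append.2 (Or.inr ((ih hxs).2 ⟨ha', hb', hab⟩)))

lemma mem_dPairs {S : List Int} (a b : Int) :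
    (a, b) ∈ dPairs S ↔ a ∈ S ∧ b ∈ S ∧ b ≠ a := by
  unfold dPairs
  simp only [List.mem_flatMap, List.mem_map, List.mem_filter]
  constructor
  · rintro ⟨a', ha', b', ⟨hb', hne⟩, he⟩
    rcases Prod.mk.inj he with ⟨rfl, rfl⟩
    exact ⟨ha', hb', by simpa using hne⟩
  · rintro ⟨ha, hb, hne⟩
    exact ⟨a, ha, b, ⟨hb, by simpa using hne⟩, rfl⟩

lemma nodup_dPairs {S : List Int} (h : S.Nodup) : (dPairs S).Nodup := by
  unfold dPairs
  rw [List.nodup_flatMap]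
  constructor
  · intro a _
    exact List.Nodup.map (fun x y hxy => congrArg Prod.snd hxy) (h.filter _)
  · refine h.imp ?_
    intro a b hab p hp hq
    rcases List.mem_map.1 hp with ⟨y, _, rfl⟩
    rcases List.mem_map.1 hq with ⟨z, _, he⟩
    exact hab (congrArg Prod.fst he).symm

-- === the two Nodup criteria in semantic form ===

lemma cwrSums_nodup_iff_sumInj {l : List Int} (hnd : l.Nodup) (hs : l.Pairwise (· < ·)) :
    (cwrSums l).Nodup ↔ SumInj l := by
  rw [cwrSums_eq_map, List.nodup_map_iff_inj_on (nodup_cwrPairs hnd)]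
  constructor
  · intro h a ha b hb c hc d hd hab hcd he
    have h1 : (a, b) ∈ cwrPairs l := (mem_cwrPairs_sorted hs a b).2 ⟨ha, hb, hab⟩
    have h2 : (c, d) ∈ cwrPairs l := (mem_cwrPairs_sorted hs c d).2 ⟨hc, hd, hcd⟩
    have := h _ h1 _ h2 he
    exact ⟨congrArg Prod.fst this, congrArg Prod.snd this⟩
  · rintro h ⟨a, b⟩ hp ⟨c, d⟩ hq he
    rcases (mem_cwrPairs_sorted hs a b).1 hp with ⟨ha, hb, hab⟩
    rcases (mem_cwrPairs_sorted hs c d).1 hq with ⟨hc, hd, hcd⟩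
    rcases h a ha b hb c hc d hd hab hcd he with ⟨rfl, rfl⟩
    rfl

lemma diffList_nodup_iff_diffInj {S : List Int} (hnd : S.Nodup) :
    (pvDiffList S).Nodup ↔ DiffInj S := by
  rw [diffList_eq_map, List.nodup_map_iff_inj_on (nodup_dPairs hnd)]
  constructor
  · intro h a ha b hb c hc d hd hba hdc he
    have h1 : (a, b) ∈ dPairs S := (mem_dPairs a b).2 ⟨ha, hb, hba⟩
    have h2 : (c, d) ∈ dPairs S := (mem_dPairs c d).2 ⟨hc, hd, hdc⟩
    have := h _ h1 _ h2 he
    exact ⟨congrArg Prod.fst this, congrArg Prod.snd this⟩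
  · rintro h ⟨a, b⟩ hp ⟨c, d⟩ hq he
    rcases (mem_dPairs a b).1 hp with ⟨ha, hb, hba⟩
    rcases (mem_dPairs c d).1 hq with ⟨hc, hd, hdc⟩
    rcases h a ha b hb c hc d hd hba hdc he with ⟨rfl, rfl⟩
    rfl

-- === the classical Sidon equivalence: sums injective ↔ differences injective ===

lemma sumInj_iff_diffInj (S : List Int) : SumInj S ↔ DiffInj S := by
  constructor
  · intro h a ha b hb c hc d hd hba hdc he
    -- b + c = a + d; apply SumInj to the sorted versions of {b,c} and {a,d}
    have hbc : min b c ∈ S := by rcases min_cases b c with ⟨h1, _⟩ | ⟨h1, _⟩ <;> rw [h1] <;> assumption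
    have hbc' : max b c ∈ S := by rcases max_cases b c with ⟨h1, _⟩ | ⟨h1, _⟩ <;> rw [h1] <;> assumption
    have had : min a d ∈ S := by rcases min_cases a d with ⟨h1, _⟩ | ⟨h1, _⟩ <;> rw [h1] <;> assumption
    have had' : max a d ∈ S := by rcases max_cases a d with ⟨h1, _⟩ | ⟨h1, _⟩ <;> rw [h1] <;> assumption
    have hsum : min b c + max b c = min a d + max a d := by
      rw [min_add_max, min_add_max]; omega
    have := h _ hbc _ hbc' _ had _ had' (min_le_max) (min_le_max) hsum
    rcases this with ⟨h1, h2⟩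
    constructor <;> omega
  · intro h a ha b hb c hc d hd hab hcd he
    by_cases hac : a = c
    · exact ⟨hac, by omega⟩
    · exfalso
      have hbc : b ≠ c := by
        intro hbc
        -- then a = d, so a ≤ b = c ≤ d = a forces all equal, contradicting a ≠ c
        omega
      have hda : d ≠ a := by intro hda; omega
      have := h c hc b hb a ha d hd hbc hda (by omega)
      exact hac this.1.symm

-- === duplicates make both sides false ===

lemma cwrSums_not_nodup_of_dup {S : List Int} (h : ¬ S.Nodup) : ¬ (cwrSums S).Nodup := by
  rcases List.exists_duplicate_iff_not_nodup.2 h with ⟨x, hdup⟩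
  have hsub : [x, x].Sublist S := List.duplicate_iff_sublist.1 hdup
  rcases hsub.exists_perm_append with ⟨S', hS⟩
  intro hnd
  have hnd2 : (cwrSums (x :: x :: S')).Nodup := ((cwrSums_perm hS).nodup_iff).1 hnd
  simp only [cwrSums, List.map_cons] at hnd2
  rcases List.nodup_cons.1 hnd2 with ⟨hmem, _⟩
  exact hmem (by simp)

-- === counting: |pvDiffList S| = n (n-1) for Nodup S ===

lemma filter_ne_length {S : List Int} (h : S.Nodup) {a : Int} (ha : a ∈ S) :
    (S.filter (fun b => b != a)).length = S.length - 1 := by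
  induction S with
  | nil => simp at ha
  | cons x xs ih =>
    rcases List.nodup_cons.1 h with ⟨hx, hxs⟩
    by_cases hxa : x = a
    · have ha' : a ∉ xs := hxa ▸ hx
      have hself : xs.filter (fun b => b != a) = xs := by
        apply List.filter_eq_self.2
        intro b hb
        simp only [bne_iff_ne, ne_eq]
        exact fun he => ha' (he ▸ hb)
      simp [hxa, hself]
    · have ha' : a ∈ xs := by
        rcases List.mem_cons.1 ha with he | ha' 
        · exact absurd he.symm hxa
        · exact ha'
      have hlen : 1 ≤ xs.length := List.length_pos_of_mem ha'
      simp only [List.filter_cons, bne_iff_ne, ne_eq, hxa, not_false_eq_true,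
        if_pos, List.length_cons]
      rw [ih hxs ha']
      omega

lemma sum_map_const_nat {α : Type} (l : List α) (g : α → Nat) (c : Nat)
    (h : ∀ a ∈ l, g a = c) : (l.map g).sum = l.length * c := by
  induction l with
  | nil => simp
  | cons x xs ih =>
    simp only [List.map_cons, List.sum_cons, List.length_cons]
    rw [h x (by simp), ih (fun a ha => h a (by simp [ha]))]
    ring

lemma diffList_length {S : List Int} (h : S.Nodup) :
    (pvDiffList S).length = S.length * (S.length - 1) := by
  unfold pvDiffList
  rw [List.length_flatMap]
  rw [show (S.map fun a => ((S.filter (fun b => b != a)).map (fun b => b - a)).length).sum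
        = (S.map fun a => (S.filter (fun b => b != a)).length).sum from by
    simp [List.length_map]]
  exact sum_map_const_nat S _ (S.length - 1) (fun a ha => filter_ne_length h ha)

-- === B's characterization ===

lemma cast_mul_pred (L : Nat) : ((L * (L - 1) : Nat) : Int) = (L : Int) * ((L : Int) - 1) := by
  cases L with
  | zero => simp
  | succ m => push_cast [Nat.succ_sub_one]; ring

lemma is_sidon_alt_eq (S : List Int) :
    is_sidon_alt S = decide (S.Nodup ∧ (pvDiffList S).Nodup) := by
  unfold is_sidon_alt
  simp only [PySem.List.len_eq]
  by_cases hnd : S.Nodup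
  · have h1 : (PySem.Set.ofList S).length = S.length := (ofList_length_eq_iff S).2 hnd
    rw [if_neg (by rw [h1]; simp)]
    have hlen : (pvDiffList S).length = S.length * (S.length - 1) := diffList_length hnd
    rw [show ((S.length : Int) * ((S.length : Int) - 1))
          = (((S.length * (S.length - 1) : Nat)) : Int) from (cast_mul_pred _).symm, ← hlen]
    by_cases hd : (pvDiffList S).Nodup
    · rw [(ofList_length_eq_iff _).2 hd]
      simp [hnd, hd]
    · have h2 : (PySem.Set.ofList (pvDiffList S)).length ≠ (pvDiffList S).length :=
        fun he => hd ((ofList_length_eq_iff _).1 he)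
      simp only [hnd, hd, and_false, decide_false]
      rw [beq_eq_false_iff_ne]
      exact_mod_cast h2
  · have h1 : (PySem.Set.ofList S).length ≠ S.length :=
      fun he => hnd ((ofList_length_eq_iff S).1 he)
    rw [if_pos (by exact_mod_cast h1)]
    simp [hnd]

-- sortedness facts about A's sorted copy
lemma sorted_id_pairwise_lt {S : List Int} (h : S.Nodup) :
    (PySem.List.sorted S (fun x => x) false).Pairwise (· < ·) := by
  have hle : (PySem.List.sorted S (fun x => x) false).Pairwise (fun a b => a ≤ b) := by
    have := PySem.List.sorted_pairwise (xs := S) (key := fun x => x)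
    exact this
  have hnd : (PySem.List.sorted S (fun x => x) false).Nodup :=
    ((PySem.List.sorted_perm S (fun x => x) false).nodup_iff).2 h
  have := List.Pairwise.and hle hnd
  exact this.imp (fun h => lt_of_le_of_ne h.1 h.2)

-- ===== VERDICT (by name: the statement is the Claim_ definition above) =====
theorem is_sidon_spec : Claim_equal_is_sidon := by
  intro S _
  unfold Spec_is_sidon
  rw [is_sidon_eq_nodup, is_sidon_alt_eq]
  by_cases hnd : S.Nodup
  · have hperm := PySem.List.sorted_perm S (fun x => x) false
    have hndT : (PySem.List.sorted S (fun x => x) false).Nodup := (hperm.nodup_iff).2 hnd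
    have hsT := sorted_id_pairwise_lt hnd
    have h1 : (cwrSums (PySem.List.sorted S (fun x => x) false)).Nodup ↔ SumInj (PySem.List.sorted S (fun x => x) false) :=
      cwrSums_nodup_iff_sumInj hndT hsT
    have h2 : SumInj (PySem.List.sorted S (fun x => x) false) ↔ SumInj S := by
      unfold SumInj
      constructor <;> intro h a ha b hb c hc d hd <;>
        exact h a (by rw [hperm.mem_iff] at *; exact ha) b (by rw [hperm.mem_iff] at *; exact hb)
          c (by rw [hperm.mem_iff] at *; exact hc) d (by rw [hperm.mem_iff] at *; exact hd)
    have h3 := sumInj_iff_diffInj S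
    have h4 := diffList_nodup_iff_diffInj hnd
    simp only [decide_eq_decide]
    rw [h1, h2, h3, ← h4]
    simp [hnd]
  · have hA : ¬ (cwrSums (PySem.List.sorted S (fun x => x) false)).Nodup := by
      apply cwrSums_not_nodup_of_dup
      intro h
      exact hnd (((PySem.List.sorted_perm S (fun x => x) false).nodup_iff).1 h)
    simp [hA, hnd]
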